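-- pv_equiv track=rewrite | github.com/cirosantilli/project-euler-solvers | solvers/651.py | divisors_and_phi
-- ===== SOURCE A (Python) =====
-- def divisors_and_phi(factors: dict[int, int]) -> list[tuple[int, int]]:
--     """
--     Enumerate all divisors d of n (given by `factors`) together with Euler's totient φ(d).
--
--     Uses the multiplicativity of φ and the closed form for prime powers:
--       φ(p^k) = 1                if k = 0
--       φ(p^k) = p^k - p^(k-1)    if k >= 1
--     """
--     res = [(1, 1)]
--     for p, e in factors.items():
--         new: list[tuple[int, int]] = []
--         pk = 1
--         for k in range(e + 1):
--             if k == 0: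
--                 phi_pk = 1
--             else:
--                 # phi(p^k) = p^(k-1) * (p-1)
--                 phi_pk = (pk // p) * (p - 1)
--             for d, ph in res:
--                 new.append((d * pk, ph * phi_pk))
--             pk *= p
--         res = new
--     return res
-- ===== SOURCE B (Python) =====
-- def divisors_and_phi(factors: dict[int, int]) -> list[tuple[int, int]]:
--     # Mixed-radix enumeration: the i-th divisor's exponent tuple is the base-(e_j+1)
--     # digits of i (first prime = least significant digit), with phi(p^k) in closed form.
--     items = list(factors.items())
--     sizes = [max(e + 1, 0) for _, e in items]  # len(range(e+1))
--     total = 1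
--     for s in sizes:
--         total *= s
--     out = []
--     for idx in range(total):
--         d = ph = 1
--         r = idx
--         for (p, _), s in zip(items, sizes):
--             k = r % s
--             r //= s
--             if k:
--                 d *= p ** k
--                 ph *= p ** (k - 1) * (p - 1)
--         out.append((d, ph))
--     return out
-- ===== Notes on version B (the rewrite author's own statement) =====
-- stated objective: alternative
-- what changed: A grows the divisor list cumulatively, rebuilding it once per prime with nested k/res loops; B enumerates divisors by a single mixed-radix pass, decoding each output index i into its exponent tuple (the base-(e_j+1) digits of i) and computing d and phi(d) independently via the closed form phi(p^k)=p^(k-1)(p-1).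
import Mathlib
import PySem

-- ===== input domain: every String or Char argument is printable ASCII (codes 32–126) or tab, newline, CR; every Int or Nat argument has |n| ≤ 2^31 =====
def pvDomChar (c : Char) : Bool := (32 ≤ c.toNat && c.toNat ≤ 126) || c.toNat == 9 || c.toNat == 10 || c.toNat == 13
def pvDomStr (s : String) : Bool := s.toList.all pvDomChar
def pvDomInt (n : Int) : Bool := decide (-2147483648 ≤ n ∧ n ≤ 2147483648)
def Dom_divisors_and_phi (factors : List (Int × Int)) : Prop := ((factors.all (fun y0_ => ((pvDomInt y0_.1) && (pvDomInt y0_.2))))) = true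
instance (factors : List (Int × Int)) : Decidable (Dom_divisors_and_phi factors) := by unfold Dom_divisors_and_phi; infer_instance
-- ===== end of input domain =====

-- B replaces A's cumulative list-growing passes by a single mixed-radix enumeration:
-- the i-th divisor's exponent tuple is read off as the base-(e+1) digits of i (objective: alternative).

-- ===== PORT A =====
def divisors_and_phi (factors : List (Int × Int)) : List (Int × Int) :=
  factors.foldl (fun res pe =>
    ((PySem.List.pyRange 0 (pe.2 + 1) 1).foldl
        (fun (st : List (Int × Int) × Int) k =>
          let phi_pk : Int := if k = 0 then 1 else (PySem.Int.floordiv st.2 pe.1) * (pe.1 - 1)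
          (st.1 ++ res.map (fun dp => (dp.1 * st.2, dp.2 * phi_pk)), st.2 * pe.1))
        ([], 1)).1)
    [(1, 1)]

-- ===== PORT B =====
def divisors_and_phi_alt (factors : List (Int × Int)) : List (Int × Int) :=
  let sizes := factors.map (fun pe => max (pe.2 + 1) 0)
  let total := sizes.foldl (· * ·) 1
  (PySem.List.pyRange 0 total 1).map (fun idx =>
    let t := (factors.zip sizes).foldl
      (fun (acc : Int × Int × Int) x =>
        let k := PySem.Int.mod acc.2.2 x.2
        let r := PySem.Int.floordiv acc.2.2 x.2
        if k ≠ 0 then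
          (acc.1 * x.1.1 ^ k.toNat, acc.2.1 * x.1.1 ^ (k - 1).toNat * (x.1.1 - 1), r)
        else (acc.1, acc.2.1, r))
      (1, 1, idx)
    (t.1, t.2.1))

-- ===== PRECONDITION & SPEC =====
-- Pre_ excludes exactly the inputs where Python A raises ZeroDivisionError:
-- a factor with prime 0 and exponent ≥ 1 (the `pk // p` division).
def Pre_divisors_and_phi (factors : List (Int × Int)) : Prop :=
  ∀ pe ∈ factors, pe.1 = 0 → pe.2 < 1
instance (factors : List (Int × Int)) : Decidable (Pre_divisors_and_phi factors) := by
  unfold Pre_divisors_and_phi; infer_instance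

def pvWitness_divisors_and_phi : (List (Int × Int)) := [(2, 2), (3, 1)]

def Spec_divisors_and_phi (factors : List (Int × Int)) (out : List (Int × Int)) : Prop :=
  out = divisors_and_phi_alt factors
instance (factors : List (Int × Int)) (out : List (Int × Int)) : Decidable (Spec_divisors_and_phi factors out) := by
  unfold Spec_divisors_and_phi; infer_instance

-- ===== CLAIM (what is proved, stated in full; the proofs are below) =====
def Claim_equal_divisors_and_phi : Prop := ∀ (factors : List (Int × Int)), Dom_divisors_and_phi factors → Pre_divisors_and_phi factors → Spec_divisors_and_phi factors (divisors_and_phi factors)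

-- ===== LEMMAS AND PROOFS =====

-- names for the pieces of B's port
def pvSz (pe : Int × Int) : Int := max (pe.2 + 1) 0
def pvT (L : List (Int × Int)) : Int := (L.map pvSz).foldl (· * ·) 1
def pvStep : (Int × Int × Int) → ((Int × Int) × Int) → (Int × Int × Int) :=
  fun acc x =>
    let k := PySem.Int.mod acc.2.2 x.2
    let r := PySem.Int.floordiv acc.2.2 x.2
    if k ≠ 0 then
      (acc.1 * x.1.1 ^ k.toNat, acc.2.1 * x.1.1 ^ (k - 1).toNat * (x.1.1 - 1), r)
    else (acc.1, acc.2.1, r)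
def pvDec (L : List (Int × Int)) (acc : Int × Int × Int) : Int × Int × Int :=
  (L.zip (L.map pvSz)).foldl pvStep acc

lemma alt_eq (L : List (Int × Int)) :
    divisors_and_phi_alt L =
      (PySem.List.pyRange 0 (pvT L) 1).map
        (fun idx => ((pvDec L (1, 1, idx)).1, (pvDec L (1, 1, idx)).2.1)) := rfl

lemma pvT_eq_prod (L : List (Int × Int)) : pvT L = (L.map pvSz).prod := by
  simp [pvT, List.prod_eq_foldl]

lemma pvT_cons (pe : Int × Int) (L : List (Int × Int)) : pvT (pe :: L) = pvSz pe * pvT L := by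
  simp [pvT_eq_prod]

lemma pvT_append (L : List (Int × Int)) (x : Int × Int) :
    pvT (L ++ [x]) = pvT L * pvSz x := by
  simp [pvT_eq_prod]

lemma pvSz_nonneg (pe : Int × Int) : 0 ≤ pvSz pe := le_max_right _ _

lemma pvT_nonneg (L : List (Int × Int)) : 0 ≤ pvT L := by
  rw [pvT_eq_prod]
  apply List.prod_nonneg
  intro a ha
  obtain ⟨pe, _, rfl⟩ := List.mem_map.mp ha
  exact pvSz_nonneg pe

lemma pvT_pos_mem (L : List (Int × Int)) (hT : 0 < pvT L) : ∀ pe ∈ L, 0 ≤ pe.2 := by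
  intro pe hpe
  by_contra h
  have hz : pvSz pe = 0 := by simp [pvSz]; omega
  have : pvT L = 0 := by
    rw [pvT_eq_prod]
    exact List.prod_eq_zero (by rw [← hz]; exact List.mem_map_of_mem hpe)
  omega

lemma pvDec_cons (pe : Int × Int) (L : List (Int × Int)) (acc : Int × Int × Int) :
    pvDec (pe :: L) acc = pvDec L (pvStep acc (pe, pvSz pe)) := by
  simp [pvDec]

lemma pvDec_append (L : List (Int × Int)) (x : Int × Int) (acc : Int × Int × Int) :
    pvDec (L ++ [x]) acc = pvStep (pvDec L acc) (x, pvSz x) := by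
  unfold pvDec
  rw [List.map_append, List.zip_append (by simp), List.foldl_append]
  rfl

lemma floordiv_mul_cancel (a b : Int) (hb : b ≠ 0) : PySem.Int.floordiv (a * b) b = a := by
  have h1 := PySem.Int.floordiv_mul_add_mod (a * b) b
  have h2 : PySem.Int.mod (a * b) b = 0 :=
    (PySem.Int.mod_eq_zero_iff_dvd _ _).mpr ⟨a, mul_comm a b⟩
  rw [h2, add_zero] at h1
  exact mul_right_cancel₀ hb h1

-- the digit-extraction fold reads only the part of the index below pvT L and hands the rest back
lemma pvDec_digits (L : List (Int × Int)) (hL : ∀ pe ∈ L, 0 ≤ pe.2) :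
    ∀ (k j d0 ph0 : Int), 0 ≤ j → j < pvT L →
      pvDec L (d0, ph0, k * pvT L + j)
        = ((pvDec L (d0, ph0, j)).1, (pvDec L (d0, ph0, j)).2.1, k) := by
  induction L with
  | nil =>
    intro k j d0 ph0 hj0 hjT
    have hT : pvT ([] : List (Int × Int)) = 1 := by simp [pvT]
    have : j = 0 := by omega
    subst this
    simp [pvDec, hT]
  | cons pe L IH =>
    intro k j d0 ph0 hj0 hjT
    have he : 0 ≤ pe.2 := hL pe List.mem_cons_self
    have hs : pvSz pe = pe.2 + 1 := by simp [pvSz]; omega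
    have hs0 : 0 < pvSz pe := by omega
    have hL' : ∀ q ∈ L, 0 ≤ q.2 := fun q hq => hL q (List.mem_cons_of_mem _ hq)
    rw [pvT_cons] at hjT
    have harg : k * pvT (pe :: L) + j = j + (k * pvT L) * pvSz pe := by
      rw [pvT_cons]; ring
    have hmod : PySem.Int.mod (k * pvT (pe :: L) + j) (pvSz pe) = PySem.Int.mod j (pvSz pe) := by
      rw [harg, PySem.Int.mod_eq_emod_of_pos hs0, PySem.Int.mod_eq_emod_of_pos hs0]
      exact Int.add_mul_emod_self_right j (k * pvT L) (pvSz pe)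
    have hdiv : PySem.Int.floordiv (k * pvT (pe :: L) + j) (pvSz pe)
        = k * pvT L + PySem.Int.floordiv j (pvSz pe) := by
      rw [harg, PySem.Int.floordiv_eq_ediv_of_pos hs0, PySem.Int.floordiv_eq_ediv_of_pos hs0,
        Int.add_mul_ediv_right _ _ (by omega : pvSz pe ≠ 0), add_comm]
    have hq0 : 0 ≤ PySem.Int.floordiv j (pvSz pe) := by
      rw [PySem.Int.floordiv_eq_ediv_of_pos hs0]; exact Int.ediv_nonneg hj0 (by omega)
    have hqT : PySem.Int.floordiv j (pvSz pe) < pvT L := by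
      rw [PySem.Int.floordiv_eq_ediv_of_pos hs0]
      exact (Int.ediv_lt_iff_lt_mul hs0).mpr (by rw [mul_comm]; exact hjT)
    rw [pvDec_cons, pvDec_cons]
    unfold pvStep
    simp only [hmod, hdiv]
    split_ifs with h
    · exact IH hL' k _ _ _ hq0 hqT
    · exact IH hL' k _ _ _ hq0 hqT

def pvPhi (p : Int) (k : Nat) : Int := if k = 0 then 1 else p ^ (k - 1) * (p - 1)

-- A's inner loop over k in range(e+1), characterised
lemma innerA (res : List (Int × Int)) (p : Int) (n : Nat) (hp : p ≠ 0 ∨ n ≤ 1) :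
    (PySem.List.pyRange 0 (n : Int) 1).foldl
      (fun (st : List (Int × Int) × Int) k =>
        (st.1 ++ res.map (fun dp => (dp.1 * st.2,
            dp.2 * (if k = 0 then 1 else (PySem.Int.floordiv st.2 p) * (p - 1)))), st.2 * p))
      ([], 1)
    = ((List.range n).flatMap
        (fun k => res.map (fun dp => (dp.1 * p ^ k, dp.2 * pvPhi p k))), p ^ n) := by
  induction n with
  | zero => simp
  | succ n IH =>
    have hp' : p ≠ 0 ∨ n ≤ 1 := by rcases hp with h | h; exacts [Or.inl h, Or.inr (by omega)]
    rw [PySem.List.pyRange_zero_nat, List.range_succ, List.map_append, List.foldl_append,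
      ← PySem.List.pyRange_zero_nat n, IH hp']
    simp only [List.map_cons, List.map_nil, List.foldl_cons, List.foldl_nil]
    rw [List.flatMap_append]
    refine Prod.ext ?_ (by simp [pow_succ])
    simp only [List.flatMap_cons, List.flatMap_nil, List.append_nil]
    congr 1
    cases n with
    | zero => simp [pvPhi]
    | succ m =>
      have hp0 : p ≠ 0 := by rcases hp with h | h; exacts [h, by omega]
      have hfd : PySem.Int.floordiv (p ^ (m + 1)) p = p ^ m := by
        rw [pow_succ]; exact floordiv_mul_cancel _ _ hp0
      have hne : ((m : Int)) + 1 ≠ 0 := by omega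
      simp [hne, pvPhi, hfd]

lemma range_mul_flatMap (s T : Nat) :
    List.range (s * T) = (List.range s).flatMap (fun k => (List.range T).map (fun j => k * T + j)) := by
  induction s with
  | zero => simp
  | succ s IH =>
    have h1 : (s + 1) * T = s * T + T := by ring
    rw [h1, List.range_add, IH, List.range_succ, List.flatMap_append]
    simp [List.flatMap]

lemma A_append (L : List (Int × Int)) (x : Int × Int) :
    divisors_and_phi (L ++ [x]) =
      ((PySem.List.pyRange 0 (x.2 + 1) 1).foldl
        (fun (st : List (Int × Int) × Int) k =>
          (st.1 ++ (divisors_and_phi L).map (fun dp => (dp.1 * st.2,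
            dp.2 * (if k = 0 then 1 else (PySem.Int.floordiv st.2 x.1) * (x.1 - 1)))), st.2 * x.1))
        ([], 1)).1 := by
  unfold divisors_and_phi
  rw [List.foldl_append]
  rfl

lemma main_eq (L : List (Int × Int)) (hPre : Pre_divisors_and_phi L) :
    divisors_and_phi L = divisors_and_phi_alt L := by
  induction L using List.reverseRecOn with
  | nil => decide
  | append_singleton L x IH =>
    have hPreL : Pre_divisors_and_phi L := fun pe h h0 => hPre pe (List.mem_append_left _ h) h0
    have hx : x.1 = 0 → x.2 < 1 := hPre x (List.mem_append_right _ List.mem_cons_self)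
    rw [A_append, IH hPreL, alt_eq (L ++ [x])]
    by_cases hneg : x.2 < 0
    · have h0 : pvSz x = 0 := by simp [pvSz]; omega
      have h1 : (x.2 + 1).toNat = 0 := by omega
      rw [pvT_append, h0, mul_zero]
      simp [PySem.List.pyRange_zero, h1]
    · have hx2 : 0 ≤ x.2 := by omega
      set n := (x.2 + 1).toNat with hn
      have hszx : pvSz x = (n : Int) := by simp only [pvSz, hn]; omega
      have hn1 : 1 ≤ n := by omega
      have hp : x.1 ≠ 0 ∨ n ≤ 1 := by
        by_cases h : x.1 = 0
        · right; have := hx h; omega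
        · exact Or.inl h
      set TN := (pvT L).toNat with hTNdef
      have hTN : pvT L = (TN : Int) := by
        have := pvT_nonneg L; omega
      -- A side
      have hxn : x.2 + 1 = (n : Int) := by omega
      rw [hxn, innerA _ _ _ hp]
      -- B side
      rw [pvT_append, hszx, hTN]
      have hmulcast : ((TN : Int)) * ((n : Int)) = (((n * TN : Nat)) : Int) := by push_cast; ring
      rw [hmulcast, PySem.List.pyRange_zero_nat, range_mul_flatMap n TN, List.map_flatMap,
        List.map_flatMap]
      show ((List.range n).flatMap
        (fun k => (divisors_and_phi_alt L).map
          (fun dp => (dp.1 * x.1 ^ k, dp.2 * pvPhi x.1 k)))) = _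
      refine List.flatMap_congr ?_
      intro k hk
      have hkn : k < n := List.mem_range.mp hk
      rw [alt_eq L, hTN, PySem.List.pyRange_zero_nat]
      simp only [List.map_map]
      refine List.map_congr_left ?_
      intro j hj
      have hjTN : j < TN := List.mem_range.mp hj
      have hTpos : (0 : Int) < pvT L := by omega
      have hL' : ∀ pe ∈ L, 0 ≤ pe.2 := pvT_pos_mem L hTpos
      have hidx : ((k * TN + j : Nat) : Int) = (k : Int) * pvT L + (j : Int) := by
        rw [hTN]; push_cast; ring
      simp only [Function.comp_apply]
      rw [pvDec_append, hidx,
        pvDec_digits L hL' (k : Int) (j : Int) 1 1 (by omega) (by omega)]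
      -- step on the appended factor x
      have hkmod : PySem.Int.mod (k : Int) (pvSz x) = (k : Int) := by
        rw [hszx, PySem.Int.mod_eq_emod_of_pos (by omega)]
        exact Int.emod_eq_of_lt (by omega) (by exact_mod_cast hkn)
      unfold pvStep
      simp only [hkmod]
      by_cases hk0 : k = 0
      · subst hk0
        simp [pvPhi]
      · have hknz : ((k : Int)) ≠ 0 := by omega
        simp only [hknz, ne_eq, not_false_iff, if_pos]
        have h1 : ((k : Int)).toNat = k := by omega
        have h2 : ((k : Int) - 1).toNat = k - 1 := by omega
        rw [h1, h2]
        simp [pvPhi, hk0, mul_assoc]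

-- ===== VERDICT (by name: the statement is the Claim_ definition above) =====
theorem divisors_and_phi_spec : Claim_equal_divisors_and_phi := by
  intro L _ hPre
  unfold Spec_divisors_and_phi
  exact main_eq L hPre
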